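-- pv_equiv track=rewrite | github.com/insdout/Algorithms-and-DS | Course_2/shortestCycle.py | shortestCycle
-- ===== SOURCE A (Python) =====
-- def z_function(text):
--     n = len(text)
--     z_array = [0 for i in range(n)]
--     left, right, relative_ind = 0, 0, 0
--     for i in range(1, n):
--         if i > right:
--             left, right = i, i
--             while right < n and text[right - left] == text[right]:
--                 right += 1
--             z_array[i] = right - left
--             right -= 1
--         else:
--             relative_ind = i - left
--             if z_array[relative_ind] < right - i + 1:
--                 z_array[i] = z_array[relative_ind]
--             else:
--                 left = i
--                 while right < n and text[right - left] == text[right]: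
--                     right += 1
--                 z_array[i] = right - left
--                 right -= 1
--     return z_array
--
-- def shortestCycle(s):
--     z_array = z_function(s)
--     n = len(s)
--     res = len(s)
--     for i in range(n-1, n//2 - 1, -1):
--         candidate = z_array[i]
--         if candidate != 0 and candidate + i == n:
--             if n % candidate != 0:
--                 continue
--             flag = True
--             for j in range(candidate, n, candidate):
--                 if z_array[j] < candidate:
--                     flag = False
--                     break
--             if flag:
--                 return candidate
--     return res
-- ===== SOURCE B (Python) =====
-- def shortestCycle(s):
--     n = len(s)
--     for c in range(1, n + 1):
--         if n % c == 0 and all(s[j] == s[j - c] for j in range(c, n)):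
--             return c
--     return n
-- ===== Notes on version B (the rewrite author's own statement) =====
-- stated objective: simpler
-- what changed: B drops the Z-array machinery entirely and directly tries each divisor-candidate c of n in ascending order, returning the first c with s[j] == s[j-c] for all j in [c, n); A builds the Z-array with the optimized Z-box algorithm and scans candidates with an inner multiples check.
import Mathlib
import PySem

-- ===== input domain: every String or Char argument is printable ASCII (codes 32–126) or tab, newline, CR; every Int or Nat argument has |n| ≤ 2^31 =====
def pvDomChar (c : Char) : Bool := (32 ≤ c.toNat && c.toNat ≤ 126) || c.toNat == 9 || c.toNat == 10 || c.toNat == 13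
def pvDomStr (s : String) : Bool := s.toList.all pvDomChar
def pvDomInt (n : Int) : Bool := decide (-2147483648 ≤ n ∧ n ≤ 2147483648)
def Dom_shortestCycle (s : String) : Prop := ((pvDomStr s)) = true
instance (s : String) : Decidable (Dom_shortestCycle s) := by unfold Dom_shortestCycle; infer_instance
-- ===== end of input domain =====

-- B replaces A's Z-array machinery by a direct ascending divisor-candidate check: simpler, not faster.
-- All Python ranges here have nonnegative bounds and are ported as Nat `List.range'` lists;
-- all list indices are provably in range, so `List.getD` is exact.

-- ===== PORT A =====
-- the `while right < n and text[right - left] == text[right]: right += 1` loop of z_function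
def zExtend (t : List Char) (left r : Nat) : Nat :=
  if h : r < t.length ∧ t.getD (r - left) ' ' = t.getD r ' ' then zExtend t left (r + 1) else r
termination_by t.length - r
decreasing_by omega

-- one iteration of z_function's `for i in range(1, n)` loop; state = (z_array, left, right)
def zStep (t : List Char) (st : List Nat × Nat × Nat) (i : Nat) : List Nat × Nat × Nat :=
  match st with
  | (z, left, right) =>
    if i > right then
      let r := zExtend t i i
      (z.set i (r - i), i, r - 1)
    else
      let rel := i - left
      if z.getD rel 0 < right - i + 1 then (z.set i (z.getD rel 0), left, right)
      else
        let r := zExtend t i right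
        (z.set i (r - i), i, r - 1)

def zFun (t : List Char) : List Nat :=
  ((List.range' 1 (t.length - 1)).foldl (zStep t) (List.replicate t.length 0, 0, 0)).1

-- `for j in range(candidate, n, candidate): if z_array[j] < candidate: flag = False; break`
def checkA (z : List Nat) (c : Nat) : List Nat → Bool
  | [] => true
  | j :: rest => if z.getD j 0 < c then false else checkA z c rest

-- `range(candidate, n, candidate)` for candidate ≥ 1
def multiples (c n : Nat) : List Nat := List.range' c ((n - 1) / c) c

-- the main `for i in range(n-1, n//2 - 1, -1)` loop with its early returns
def scanA (z : List Nat) (n : Nat) : List Nat → Int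
  | [] => (n : Int)
  | i :: rest =>
    let c := z.getD i 0
    if c ≠ 0 ∧ c + i = n then
      if n % c ≠ 0 then scanA z n rest
      else if checkA z c (multiples c n) then (c : Int) else scanA z n rest
    else scanA z n rest

def shortestCycle (s : String) : Int :=
  let t := s.toList
  let z := zFun t
  let n := t.length
  scanA z n (List.range' (n / 2) (n - n / 2)).reverse

-- ===== PORT B =====
-- `all(s[j] == s[j - c] for j in range(c, n))`
def allEq (t : List Char) (c : Nat) : List Nat → Bool
  | [] => true
  | j :: rest => if t.getD j ' ' = t.getD (j - c) ' ' then allEq t c rest else false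

-- `for c in range(1, n + 1)` with its early return
def scanB (t : List Char) (n : Nat) : List Nat → Int
  | [] => (n : Int)
  | c :: rest =>
    if n % c = 0 ∧ allEq t c (List.range' c (n - c)) then (c : Int) else scanB t n rest

def shortestCycle_alt (s : String) : Int :=
  let t := s.toList
  let n := t.length
  scanB t n (List.range' 1 n)

-- ===== PRECONDITION & SPEC =====
def Spec_shortestCycle (s : String) (out : Int) : Prop := out = shortestCycle_alt s
instance (s : String) (out : Int) : Decidable (Spec_shortestCycle s out) := by unfold Spec_shortestCycle; infer_instance

-- ===== CLAIM (what is proved, stated in full; the proofs are below) =====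
def Claim_equal_shortestCycle : Prop := ∀ (s : String), Dom_shortestCycle s → Spec_shortestCycle s (shortestCycle s)

-- ===== LEMMAS AND PROOFS =====

-- longest common prefix length of two lists
def lcp : List Char → List Char → Nat
  | a :: as, b :: bs => if a = b then lcp as bs + 1 else 0
  | _, _ => 0

-- the true Z-value at position i
def Zv (t : List Char) (i : Nat) : Nat := lcp t (t.drop i)

-- "c is a period of t": s[j] == s[j-c] for all j in [c, len t)
def Per (t : List Char) (c : Nat) : Prop :=
  ∀ j, c ≤ j → j < t.length → t.getD j ' ' = t.getD (j - c) ' '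

theorem lcp_le_right : ∀ (a b : List Char), lcp a b ≤ b.length := by
  intro a
  induction a with
  | nil => intro b; cases b <;> simp [lcp]
  | cons x as ih =>
    intro b
    cases b with
    | nil => simp [lcp]
    | cons y bs =>
      simp only [lcp]
      split
      · simpa using ih bs
      · simp

theorem lcp_match : ∀ (a b : List Char) (k : Nat), k < lcp a b →
    a.getD k ' ' = b.getD k ' ' := by
  intro a
  induction a with
  | nil => intro b k h; cases b <;> simp [lcp] at h
  | cons x as ih =>
    intro b k h
    cases b with
    | nil => simp [lcp] at h
    | cons y bs =>
      simp only [lcp] at h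
      by_cases hxy : x = y
      · simp only [if_pos hxy] at h
        cases k with
        | zero => simp [hxy]
        | succ k => simpa using ih bs k (by omega)
      · simp [if_neg hxy] at h

theorem lcp_mismatch : ∀ (a b : List Char), lcp a b < a.length → lcp a b < b.length →
    a.getD (lcp a b) ' ' ≠ b.getD (lcp a b) ' ' := by
  intro a
  induction a with
  | nil => intro b h _; simp at h
  | cons x as ih =>
    intro b h1 h2
    cases b with
    | nil => simp at h2
    | cons y bs =>
      simp only [lcp] at *
      by_cases hxy : x = y
      · simp only [if_pos hxy] at *
        simpa using ih bs (by simpa using h1) (by simpa using h2)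
      · simp only [if_neg hxy] at *
        simpa using hxy

theorem le_lcp : ∀ (a b : List Char) (m : Nat), m ≤ a.length → m ≤ b.length →
    (∀ k, k < m → a.getD k ' ' = b.getD k ' ') → m ≤ lcp a b := by
  intro a
  induction a with
  | nil =>
    intro b m h _ _
    have hm : m = 0 := by simpa using h
    subst hm; exact Nat.zero_le _
  | cons x as ih =>
    intro b m h1 h2 h3
    cases m with
    | zero => exact Nat.zero_le _
    | succ m =>
      cases b with
      | nil => simp at h2
      | cons y bs =>
        have hxy : x = y := by simpa using h3 0 (Nat.succ_pos m)
        simp only [lcp, if_pos hxy]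
        have := ih bs m (by simpa using h1) (by simpa using h2)
          (fun k hk => by simpa using h3 (k + 1) (by omega))
        omega

theorem getD_drop (t : List Char) (i k : Nat) :
    (t.drop i).getD k ' ' = t.getD (i + k) ' ' := by
  simp [List.getD_eq_getElem?_getD, List.getElem?_drop]

theorem Zv_le (t : List Char) (i : Nat) : Zv t i ≤ t.length - i := by
  have := lcp_le_right t (t.drop i)
  simpa [Zv] using this

theorem Zv_match (t : List Char) (i k : Nat) (h : k < Zv t i) :
    t.getD k ' ' = t.getD (i + k) ' ' := by
  have := lcp_match t (t.drop i) k h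
  rwa [getD_drop] at this

theorem Zv_mismatch (t : List Char) (i : Nat) (h : i + Zv t i < t.length) :
    t.getD (Zv t i) ' ' ≠ t.getD (i + Zv t i) ' ' := by
  have h1 : Zv t i < t.length := by omega
  have h2 : Zv t i < (t.drop i).length := by
    simp only [List.length_drop]; omega
  have := lcp_mismatch t (t.drop i) h1 h2
  rwa [getD_drop] at this

theorem le_Zv (t : List Char) (i m : Nat) (hm : m ≤ t.length - i)
    (h : ∀ k, k < m → t.getD k ' ' = t.getD (i + k) ' ') : m ≤ Zv t i := by
  refine le_lcp t (t.drop i) m (by omega) (by simpa using hm) ?_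
  intro k hk
  rw [getD_drop]
  exact h k hk

-- the extend loop computes the true Z-value given an already-matched region [i, r)
theorem Zv_eq_sub (t : List Char) (i r : Nat) (hir : i ≤ r) (hr : r ≤ t.length)
    (pre : ∀ j, i ≤ j → j < r → t.getD (j - i) ' ' = t.getD j ' ')
    (stop : r = t.length ∨ t.getD (r - i) ' ' ≠ t.getD r ' ') :
    Zv t i = r - i := by
  have hlow : r - i ≤ Zv t i := by
    refine le_Zv t i (r - i) (by omega) ?_
    intro k hk
    have := pre (i + k) (by omega) (by omega)
    simpa using this
  have hhigh : Zv t i ≤ r - i := by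
    rcases stop with h | h
    · have := Zv_le t i; omega
    · by_contra hc
      have := Zv_match t i (r - i) (by omega)
      rw [Nat.add_sub_cancel' hir] at this
      exact h this
  omega

theorem zExtend_spec (t : List Char) (i : Nat) : ∀ (r : Nat), i ≤ r → r ≤ t.length →
    (∀ j, i ≤ j → j < r → t.getD (j - i) ' ' = t.getD j ' ') →
    zExtend t i r = i + Zv t i := by
  suffices H : ∀ fuel r, t.length - r ≤ fuel → i ≤ r → r ≤ t.length →
      (∀ j, i ≤ j → j < r → t.getD (j - i) ' ' = t.getD j ' ') →
      zExtend t i r = i + Zv t i by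
    intro r h1 h2 h3
    exact H (t.length - r) r le_rfl h1 h2 h3
  intro fuel
  induction fuel with
  | zero =>
    intro r hfuel h1 h2 h3
    have hr : r = t.length := by omega
    rw [zExtend]
    have hneg : ¬ (r < t.length ∧ t.getD (r - i) ' ' = t.getD r ' ') := by
      intro hco; omega
    rw [dif_neg hneg]
    have := Zv_eq_sub t i r h1 h2 h3 (Or.inl hr)
    omega
  | succ fuel ih =>
    intro r hfuel h1 h2 h3
    rw [zExtend]
    by_cases hc : r < t.length ∧ t.getD (r - i) ' ' = t.getD r ' '
    · rw [dif_pos hc]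
      refine ih (r + 1) (by omega) (by omega) (by omega) ?_
      intro j hj1 hj2
      rcases Nat.lt_or_ge j r with hj | hj
      · exact h3 j hj1 hj
      · have hjr : j = r := by omega
        subst hjr
        exact hc.2
    · rw [dif_neg hc]
      have stop : r = t.length ∨ t.getD (r - i) ' ' ≠ t.getD r ' ' := by
        by_cases hr : r = t.length
        · exact Or.inl hr
        · exact Or.inr (fun he => hc ⟨by omega, he⟩)
      have := Zv_eq_sub t i r h1 h2 h3 stop
      omega

-- loop invariant for z_function's main loop
def ZInv (t : List Char) (i : Nat) (st : List Nat × Nat × Nat) : Prop :=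
  st.1.length = t.length ∧
  (∀ k, 1 ≤ k → k < i → st.1.getD k 0 = Zv t k) ∧
  st.2.1 < i ∧
  (st.2.1 ≤ st.2.2 → st.2.2 < t.length ∧
    ∀ k, k ≤ st.2.2 - st.2.1 → t.getD k ' ' = t.getD (st.2.1 + k) ' ') ∧
  (st.2.2 = 0 ∨ 1 ≤ st.2.1)

theorem getD_set_self (z : List Nat) (i v : Nat) (h : i < z.length) :
    (z.set i v).getD i 0 = v := by
  simp [List.getD_eq_getElem?_getD, h]

theorem getD_set_ne (z : List Nat) (i k v : Nat) (h : i ≠ k) :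
    (z.set i v).getD k 0 = z.getD k 0 := by
  simp [List.getD_eq_getElem?_getD, List.getElem?_set_ne h]

theorem zStep_inv (t : List Char) (i : Nat) (st : List Nat × Nat × Nat)
    (hinv : ZInv t i st) (h1 : 1 ≤ i) (h2 : i < t.length) :
    ZInv t (i + 1) (zStep t st i) := by
  obtain ⟨z, left, right⟩ := st
  obtain ⟨A1, A2, A3, A4, A5⟩ := hinv
  simp only [ZInv] at *
  by_cases hbr : i > right
  · -- first branch: fresh extension from i
    have hext : zExtend t i i = i + Zv t i :=
      zExtend_spec t i i le_rfl (le_of_lt h2) (by omega)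
    have hZle := Zv_le t i
    simp only [zStep, if_pos hbr, hext]
    refine ⟨by simpa using A1, ?_, by omega, ?_, Or.inr h1⟩
    · intro k hk1 hk2
      rcases Nat.lt_or_ge k i with hk | hk
      · rw [getD_set_ne z i k _ (by omega)]; exact A2 k hk1 hk
      · have hki : k = i := by omega
        subst hki
        rw [getD_set_self z k _ (by omega)]
        omega
    · intro hle
      have hZ1 : 1 ≤ Zv t i := by omega
      constructor
      · omega
      · intro k hk
        exact Zv_match t i k (by omega)
  · -- second branch: i ≤ right, so the box is nonempty
    have hir : i ≤ right := by omega
    have hlr : left ≤ right := by omega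
    obtain ⟨hrn, hbox⟩ := A4 hlr
    have hl1 : 1 ≤ left := by
      rcases A5 with h | h
      · omega
      · exact h
    have hrel1 : 1 ≤ i - left := by omega
    have hzrel : z.getD (i - left) 0 = Zv t (i - left) := A2 (i - left) hrel1 (by omega)
    have hleftrel : left + (i - left) = i := by omega
    by_cases hlt : z.getD (i - left) 0 < right - i + 1
    · -- copy case
      rw [hzrel] at hlt
      set m := Zv t (i - left) with hm
      have hmatch : ∀ k, k < m → t.getD k ' ' = t.getD (i + k) ' ' := by
        intro k hk
        have e1 : t.getD k ' ' = t.getD ((i - left) + k) ' ' := Zv_match t (i - left) k hk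
        have e2 : t.getD ((i - left) + k) ' ' = t.getD (left + ((i - left) + k)) ' ' :=
          hbox ((i - left) + k) (by omega)
        rw [e1, e2]
        congr 1
        omega
      have hZeq : Zv t i = m := by
        have hlow : m ≤ Zv t i := le_Zv t i m (by omega) hmatch
        have hhigh : Zv t i ≤ m := by
          by_contra hc
          have hmm : (i - left) + m < t.length := by omega
          have hmis := Zv_mismatch t (i - left) (by omega)
          have e2 : t.getD ((i - left) + m) ' ' = t.getD (left + ((i - left) + m)) ' ' :=
            hbox ((i - left) + m) (by omega)
          have e3 : t.getD m ' ' = t.getD (i + m) ' ' := Zv_match t i m (by omega)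
          apply hmis
          rw [e2]
          have : left + ((i - left) + m) = i + m := by omega
          rw [this]
          exact e3
        omega
      simp only [zStep, if_neg hbr, if_pos (hzrel ▸ hlt)]
      refine ⟨by simpa using A1, ?_, by omega, ?_, Or.inr hl1⟩
      · intro k hk1 hk2
        rcases Nat.lt_or_ge k i with hk | hk
        · rw [getD_set_ne z i k _ (by omega)]; exact A2 k hk1 hk
        · have hki : k = i := by omega
          subst hki
          rw [getD_set_self z k _ (by omega), hzrel, hZeq]
      · intro hle
        exact ⟨hrn, hbox⟩
    · -- re-extend case from the current right edge
      rw [hzrel] at hlt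
      have hpre : ∀ j, i ≤ j → j < right → t.getD (j - i) ' ' = t.getD j ' ' := by
        intro j hj1 hj2
        have hk : j - i < Zv t (i - left) := by omega
        have e1 : t.getD (j - i) ' ' = t.getD ((i - left) + (j - i)) ' ' :=
          Zv_match t (i - left) (j - i) hk
        have e2 : t.getD ((i - left) + (j - i)) ' ' = t.getD (left + ((i - left) + (j - i))) ' ' :=
          hbox ((i - left) + (j - i)) (by omega)
        rw [e1, e2]
        congr 1
        omega
      have hext : zExtend t i right = i + Zv t i :=
        zExtend_spec t i right hir (le_of_lt hrn) hpre
      have hZle := Zv_le t i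
      have hlt0 : ¬ z.getD (i - left) 0 < right - i + 1 := by rw [hzrel]; exact hlt
      simp only [zStep, if_neg hbr, if_neg hlt0, hext]
      refine ⟨by simpa using A1, ?_, by omega, ?_, Or.inr h1⟩
      · intro k hk1 hk2
        rcases Nat.lt_or_ge k i with hk | hk
        · rw [getD_set_ne z i k _ (by omega)]; exact A2 k hk1 hk
        · have hki : k = i := by omega
          subst hki
          rw [getD_set_self z k _ (by omega)]
          omega
      · intro hle
        have hZ1 : 1 ≤ Zv t i := by omega
        constructor
        · omega
        · intro k hk
          exact Zv_match t i k (by omega)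

theorem zFold_inv (t : List Char) :
    ∀ (len a : Nat) (st : List Nat × Nat × Nat), ZInv t a st → 1 ≤ a →
      a + len ≤ t.length →
      ZInv t (a + len) ((List.range' a len).foldl (zStep t) st) := by
  intro len
  induction len with
  | zero => intro a st h _ _; simpa using h
  | succ len ih =>
    intro a st h ha hlen
    rw [List.range'_succ]
    simp only [List.foldl_cons]
    have := ih (a + 1) (zStep t st a) (zStep_inv t a st h ha (by omega)) (by omega) (by omega)
    have harith : a + 1 + len = a + (len + 1) := by omega
    rwa [harith] at this

theorem zFun_spec (t : List Char) :
    ∀ k, 1 ≤ k → k < t.length → (zFun t).getD k 0 = Zv t k := by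
  intro k hk1 hk2
  have hn : 1 ≤ t.length := by omega
  have hinit : ZInv t 1 (List.replicate t.length 0, 0, 0) := by
    simp only [ZInv]
    refine ⟨by simp, by omega, by omega, ?_, Or.inl (by simp)⟩
    intro _
    refine ⟨by omega, ?_⟩
    intro k hk
    have hk0 : k = 0 := by omega
    subst hk0
    rfl
  have hfold := zFold_inv t (t.length - 1) 1 (List.replicate t.length 0, 0, 0) hinit le_rfl (by omega)
  have harith : 1 + (t.length - 1) = t.length := by omega
  rw [harith] at hfold
  exact hfold.2.1 k hk1 hk2

-- boolean divisor-period test; G c ⟺ (c ∣ n ∧ c is a period), for 1 ≤ c ≤ n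
def GoodB (t : List Char) (n c : Nat) : Bool :=
  decide (n % c = 0) && (List.range' c (n - c)).all (fun j => t.getD j ' ' == t.getD (j - c) ' ')

theorem allEq_eq_all (t : List Char) (c : Nat) :
    ∀ l : List Nat, allEq t c l = l.all (fun j => t.getD j ' ' == t.getD (j - c) ' ') := by
  intro l
  induction l with
  | nil => rfl
  | cons j rest ih =>
    simp only [allEq, List.all_cons, beq_eq_decide, ih]
    by_cases h : t.getD j ' ' = t.getD (j - c) ' '
    · rw [if_pos h, decide_eq_true h, Bool.true_and]
    · rw [if_neg h, decide_eq_false h, Bool.false_and]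

theorem goodB_iff (t : List Char) (c : Nat) :
    GoodB t t.length c = true ↔ t.length % c = 0 ∧ Per t c := by
  simp only [GoodB, Bool.and_eq_true, decide_eq_true_iff, List.all_eq_true, List.mem_range'_1,
    beq_iff_eq]
  constructor
  · rintro ⟨h1, h2⟩
    refine ⟨h1, ?_⟩
    intro j hj1 hj2
    exact h2 j ⟨hj1, by omega⟩
  · rintro ⟨h1, h2⟩
    refine ⟨h1, ?_⟩
    rintro j ⟨hj1, hj2⟩
    exact h2 j hj1 (by omega)

theorem per_mul (t : List Char) (c : Nat) (h : Per t c) : ∀ q, Per t (q * c) := by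
  intro q
  induction q with
  | zero => intro j _ _; simp
  | succ q ih =>
    intro j hj1 hj2
    have hcj : c ≤ j := by
      have : c ≤ (q + 1) * c := by nlinarith
      omega
    have hqc : q * c ≤ j - c := by
      have : q * c + c ≤ j := by nlinarith
      omega
    have e1 : t.getD j ' ' = t.getD (j - c) ' ' := h j hcj hj2
    have e2 : t.getD (j - c) ' ' = t.getD ((j - c) - q * c) ' ' := ih (j - c) hqc (by omega)
    rw [e1, e2]
    congr 1
    have : (q + 1) * c = q * c + c := by ring
    omega

theorem Zv_of_per (t : List Char) (m : Nat) (hm : m ≤ t.length) (h : Per t m) :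
    Zv t m = t.length - m := by
  have hlow : t.length - m ≤ Zv t m := by
    refine le_Zv t m (t.length - m) le_rfl ?_
    intro k hk
    have := h (m + k) (by omega) (by omega)
    simpa using this.symm
  have := Zv_le t m
  omega

-- A's inner flag loop
theorem checkA_iff (z : List Nat) (c : Nat) (l : List Nat) :
    checkA z c l = true ↔ ∀ j ∈ l, c ≤ z.getD j 0 := by
  induction l with
  | nil => simp [checkA]
  | cons j rest ih =>
    simp only [checkA, List.mem_cons]
    by_cases h : z.getD j 0 < c
    · simp only [if_pos h]
      constructor
      · intro hfalse; simp at hfalse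
      · intro hall
        have := hall j (Or.inl rfl)
        omega
    · simp only [if_neg h, ih]
      constructor
      · intro hall j' hj'
        rcases hj' with hj' | hj'
        · subst hj'; omega
        · exact hall j' hj'
      · intro hall j' hj'
        exact hall j' (Or.inr hj')

-- scanB returns the first Good candidate, else n
theorem scanB_cond_iff (t : List Char) (n c : Nat) :
    (n % c = 0 ∧ allEq t c (List.range' c (n - c)) = true) ↔ GoodB t n c = true := by
  simp [GoodB, allEq_eq_all]

theorem scanB_hit (t : List Char) (n : Nat) (l₁ : List Nat) (c : Nat) (l₂ : List Nat)
    (h₁ : ∀ c' ∈ l₁, GoodB t n c' = false) (h₂ : GoodB t n c = true) :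
    scanB t n (l₁ ++ c :: l₂) = (c : Int) := by
  induction l₁ with
  | nil =>
    simp only [List.nil_append, scanB]
    rw [if_pos ((scanB_cond_iff t n c).mpr h₂)]
  | cons c' rest ih =>
    simp only [List.cons_append, scanB]
    rw [if_neg, ih (fun x hx => h₁ x (List.mem_cons_of_mem _ hx))]
    intro hcond
    have := (scanB_cond_iff t n c').mp hcond
    rw [h₁ c' List.mem_cons_self] at this
    exact Bool.false_ne_true this

-- A's test at position i
def testA (z : List Nat) (n i : Nat) : Prop :=
  z.getD i 0 ≠ 0 ∧ z.getD i 0 + i = n ∧ n % z.getD i 0 = 0 ∧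
    checkA z (z.getD i 0) (multiples (z.getD i 0) n) = true

theorem scanA_cons (z : List Nat) (n i : Nat) (rest : List Nat) (h : ¬ testA z n i) :
    scanA z n (i :: rest) = scanA z n rest := by
  simp only [scanA, testA] at *
  split_ifs with h1 h2 h3
  · rfl
  · exfalso
    exact h ⟨h1.1, h1.2, by omega, h3⟩
  · rfl
  · rfl

theorem scanA_none (z : List Nat) (n : Nat) (l : List Nat)
    (h : ∀ i ∈ l, ¬ testA z n i) : scanA z n l = (n : Int) := by
  induction l with
  | nil => rfl
  | cons i rest ih =>
    rw [scanA_cons z n i rest (h i List.mem_cons_self)]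
    exact ih (fun i' hi' => h i' (List.mem_cons_of_mem _ hi'))

theorem scanA_hit (z : List Nat) (n : Nat) (l₁ : List Nat) (i : Nat) (l₂ : List Nat)
    (h₁ : ∀ i' ∈ l₁, ¬ testA z n i') (h₂ : testA z n i) :
    scanA z n (l₁ ++ i :: l₂) = ((z.getD i 0 : Nat) : Int) := by
  induction l₁ with
  | nil =>
    obtain ⟨t1, t2, t3, t4⟩ := h₂
    simp only [List.nil_append, scanA]
    rw [if_pos ⟨t1, t2⟩, if_neg (by omega), if_pos t4]
  | cons i' rest ih =>
    rw [List.cons_append, scanA_cons z n i' _ (h₁ i' List.mem_cons_self)]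
    exact ih (fun x hx => h₁ x (List.mem_cons_of_mem _ hx))

-- the key pointwise equivalence: A's test at i ⟺ Good (n - i), for n ≥ 2 and n/2 ≤ i < n
theorem mem_multiples (c n j : Nat) (hc : 1 ≤ c) :
    j ∈ multiples c n ↔ ∃ q, 1 ≤ q ∧ q * c < n ∧ j = q * c := by
  rw [multiples, List.mem_range']
  constructor
  · rintro ⟨k, hk1, hk2⟩
    refine ⟨k + 1, by omega, ?_, by rw [hk2]; ring⟩
    have hle : k + 1 ≤ (n - 1) / c := by omega
    have := (Nat.le_div_iff_mul_le hc).mp hle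
    have hexp : (k + 1) * c = c * k + c := by ring
    omega
  · rintro ⟨q, hq1, hq2, hq3⟩
    refine ⟨q - 1, ?_, ?_⟩
    · have : q ≤ (n - 1) / c := (Nat.le_div_iff_mul_le hc).mpr (by omega)
      omega
    · rw [hq3]
      cases q with
      | zero => omega
      | succ q' => simp; ring

theorem testA_iff_good (t : List Char) (i : Nat) (hn : 2 ≤ t.length)
    (hi₁ : t.length / 2 ≤ i) (hi₂ : i < t.length) :
    testA (zFun t) t.length i ↔ GoodB t t.length (t.length - i) = true := by
  have hi0 : 1 ≤ i := by omega
  have hz : (zFun t).getD i 0 = Zv t i := zFun_spec t i hi0 hi₂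
  rw [goodB_iff]
  constructor
  · rintro ⟨t1, t2, t3, t4⟩
    rw [hz] at t1 t2 t3 t4
    have hc : Zv t i = t.length - i := by omega
    rw [hc] at t3 t4
    set n := t.length with hndef
    set c := n - i with hcdef
    have hc1 : 1 ≤ c := by omega
    refine ⟨t3, ?_⟩
    have hmult : ∀ q, 1 ≤ q → q * c < n → c ≤ Zv t (q * c) := by
      intro q hq1 hq2
      have hmem : q * c ∈ multiples c n := (mem_multiples c n _ hc1).mpr ⟨q, hq1, hq2, rfl⟩
      have hq0 : 1 ≤ q * c := Nat.mul_le_mul hq1 hc1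
      have := (checkA_iff _ c _).mp t4 (q * c) hmem
      rwa [zFun_spec t (q * c) hq0 hq2] at this
    intro j hj1 hj2
    have hc0 : 0 < c := hc1
    have hq1 : 1 ≤ j / c := (Nat.one_le_div_iff hc0).mpr hj1
    have hmod := Nat.div_add_mod j c
    have hr : j % c < c := Nat.mod_lt _ hc0
    have hcomm : (j / c) * c = c * (j / c) := Nat.mul_comm _ _
    have h1 : c ≤ Zv t ((j / c) * c) := hmult (j / c) hq1 (by omega)
    have e1 : t.getD (j % c) ' ' = t.getD ((j / c) * c + j % c) ' ' :=
      Zv_match t ((j / c) * c) (j % c) (by omega)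
    have ejr : (j / c) * c + j % c = j := by omega
    rw [ejr] at e1
    by_cases hq2 : j / c = 1
    · have hjc : j - c = j % c := by
        rw [hq2] at hcomm hmod
        omega
      rw [hjc]
      exact e1.symm
    · have hq3 : 2 ≤ j / c := by omega
      have hmono : (j / c - 1) * c ≤ (j / c) * c := Nat.mul_le_mul_right c (by omega)
      have h2 : c ≤ Zv t ((j / c - 1) * c) := hmult (j / c - 1) (by omega) (by omega)
      have e2 : t.getD (j % c) ' ' = t.getD ((j / c - 1) * c + j % c) ' ' :=
        Zv_match t ((j / c - 1) * c) (j % c) (by omega)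
      have hsub : (j / c - 1) * c = (j / c) * c - c := by
        rw [Nat.sub_mul]
        simp
      have hfc : c ≤ (j / c) * c := Nat.le_mul_of_pos_left c (by omega)
      have ej2 : (j / c - 1) * c + j % c = j - c := by
        rw [hsub]
        omega
      rw [ej2] at e2
      exact e1.symm.trans e2
  · rintro ⟨h1, h2⟩
    set n := t.length with hndef
    set c := n - i with hcdef
    have hc1 : 1 ≤ c := by omega
    have hcn : c < n := by omega
    obtain ⟨d, hd⟩ := Nat.dvd_of_mod_eq_zero h1
    have hd2 : 2 ≤ d := by
      rcases d with _ | _ | d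
      · omega
      · omega
      · omega
    have hdc : (d - 1) * c = c * d - c := by
      rw [Nat.sub_mul, Nat.mul_comm]
      simp
    have hiq : i = (d - 1) * c := by omega
    have hPi : Per t i := by
      rw [hiq]
      have := per_mul t c h2 (d - 1)
      rwa [Nat.mul_comm] at this ⊢
    have hZi : Zv t i = c := by
      rw [Zv_of_per t i (le_of_lt hi₂) hPi]
    refine ⟨by rw [hz, hZi]; omega, by rw [hz, hZi]; omega, by rw [hz, hZi]; exact h1, ?_⟩
    rw [hz, hZi, checkA_iff]
    intro j hjmem
    obtain ⟨q, hq1, hq2, hq3⟩ := (mem_multiples c n j hc1).mp hjmem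
    have hj1 : 1 ≤ j := by
      rw [hq3]
      exact Nat.mul_le_mul hq1 hc1
    have hPj : Per t j := by
      rw [hq3]
      have := per_mul t c h2 q
      exact this
    have hZj : Zv t j = n - j := Zv_of_per t j (by omega) hPj
    rw [zFun_spec t j hj1 (by omega), hZj]
    -- j + c ≤ n since c ∣ n and j is a smaller multiple of c
    have hqd : q < d := by
      have : q * c < d * c := by
        rw [Nat.mul_comm d c, ← hd]
        omega
      exact Nat.lt_of_mul_lt_mul_right this
    have : (q + 1) * c ≤ d * c := Nat.mul_le_mul_right c (by omega)
    have hdn : d * c = n := by rw [Nat.mul_comm]; omega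
    have : q * c + c ≤ n := by
      have e : (q + 1) * c = q * c + c := by ring
      omega
    omega

theorem range'_split3 (a x len : Nat) (h1 : a ≤ x) (h2 : x < a + len) :
    List.range' a len = List.range' a (x - a) ++ x :: List.range' (x + 1) (a + len - x - 1) := by
  have happ : List.range' a (x - a) ++ List.range' (a + (x - a)) ((a + len - x - 1) + 1) =
      List.range' a ((x - a) + ((a + len - x - 1) + 1)) := by
    simp
  have hax : a + (x - a) = x := by omega
  have hlen : (x - a) + ((a + len - x - 1) + 1) = len := by omega
  rw [hax, hlen] at happ
  rw [← happ, List.range'_succ]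

theorem main_eq (t : List Char) :
    scanA (zFun t) t.length (List.range' (t.length / 2) (t.length - t.length / 2)).reverse =
      scanB t t.length (List.range' 1 t.length) := by
  rcases Nat.lt_or_ge t.length 2 with hn | hn
  · have h01 : t.length = 0 ∨ t.length = 1 := by omega
    rcases h01 with h0 | h1
    · rw [h0]
      simp [scanA, scanB]
    · rw [h1]
      have hz : zFun t = List.replicate t.length 0 := by
        rw [zFun, h1]
        simp
      rw [hz, h1]
      simp [scanA, scanB, allEq, List.range'_succ]
  · -- n ≥ 2
    have hGn : GoodB t t.length t.length = true := by
      rw [goodB_iff]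
      exact ⟨Nat.mod_self _, fun j hj1 hj2 => absurd (lt_of_le_of_lt hj1 hj2) (lt_irrefl _)⟩
    have hex : ∃ c, GoodB t t.length c = true := ⟨t.length, hGn⟩
    have hc0G : GoodB t t.length (Nat.find hex) = true := Nat.find_spec hex
    set c0 := Nat.find hex with hc0def
    have hmin : ∀ c, c < c0 → GoodB t t.length c = false := by
      intro c hc
      have := Nat.find_min hex hc
      simpa using this
    have hc0n : c0 ≤ t.length := Nat.find_min' hex hGn
    have hc01 : 1 ≤ c0 := by
      rcases Nat.eq_zero_or_pos c0 with h | h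
      · exfalso
        rw [h] at hc0G
        rw [goodB_iff] at hc0G
        have := hc0G.1
        simp [Nat.mod_zero] at this
        omega
      · exact h
    -- B side returns c0
    have hBsplit : List.range' 1 t.length =
        List.range' 1 (c0 - 1) ++ c0 :: List.range' (c0 + 1) (t.length - c0) := by
      have := range'_split3 1 c0 t.length hc01 (by omega)
      have e : 1 + t.length - c0 - 1 = t.length - c0 := by omega
      have e2 : c0 - 1 = c0 - 1 := rfl
      rw [this, e]
    have hB : scanB t t.length (List.range' 1 t.length) = (c0 : Int) := by
      rw [hBsplit]
      refine scanB_hit t t.length _ c0 _ ?_ hc0G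
      intro c' hc'
      rw [List.mem_range'_1] at hc'
      exact hmin c' (by omega)
    rw [hB]
    -- A side
    by_cases hle : c0 ≤ t.length - t.length / 2
    · -- the hit is at i0 = n - c0
      have hi0a : t.length / 2 ≤ t.length - c0 := by omega
      have hi0b : t.length - c0 < t.length := by omega
      have htest : testA (zFun t) t.length (t.length - c0) := by
        rw [testA_iff_good t (t.length - c0) hn hi0a hi0b]
        have e : t.length - (t.length - c0) = c0 := by omega
        rw [e]
        exact hc0G
      have hpre : ∀ i' ∈ (List.range' (t.length - c0 + 1)
          (t.length / 2 + (t.length - t.length / 2) - (t.length - c0) - 1)).reverse,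
          ¬ testA (zFun t) t.length i' := by
        intro i' hi'
        rw [List.mem_reverse, List.mem_range'_1] at hi'
        rw [testA_iff_good t i' hn (by omega) (by omega)]
        have hfalse := hmin (t.length - i') (by omega)
        rw [hfalse]
        simp
      have hAsplit := range'_split3 (t.length / 2) (t.length - c0)
        (t.length - t.length / 2) hi0a (by omega)
      rw [hAsplit, List.reverse_append, List.reverse_cons, List.append_assoc,
        List.singleton_append]
      rw [scanA_hit (zFun t) t.length _ _ _ hpre htest]
      obtain ⟨u1, u2, _, _⟩ := htest
      have hval : (zFun t).getD (t.length - c0) 0 = c0 := by omega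
      rw [hval]
    · -- no candidate in range    · -- no candidate in range: both sides are n, and c0 = n
      have hA : scanA (zFun t) t.length
          (List.range' (t.length / 2) (t.length - t.length / 2)).reverse = (t.length : Int) := by
        refine scanA_none (zFun t) t.length _ ?_
        intro i hi
        rw [List.mem_reverse, List.mem_range'_1] at hi
        rw [testA_iff_good t i hn (by omega) (by omega)]
        have := hmin (t.length - i) (by omega)
        rw [this]
        simp
      have hc0eq : c0 = t.length := by
        by_contra hne
        have hlt : c0 < t.length := by omega
        rw [goodB_iff] at hc0G
        obtain ⟨d, hd⟩ := Nat.dvd_of_mod_eq_zero hc0G.1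
        have hd2 : 2 ≤ d := by
          rcases d with _ | _ | d
          · omega
          · omega
          · omega
        have h2c : c0 * 2 ≤ t.length := by
          calc c0 * 2 ≤ c0 * d := Nat.mul_le_mul_left c0 hd2
          _ = t.length := hd.symm
        have : c0 ≤ t.length / 2 := (Nat.le_div_iff_mul_le (by omega)).mpr h2c
        omega
      rw [hA, hc0eq]

-- ===== VERDICT (by name: the statement is the Claim_ definition above) =====
theorem shortestCycle_spec : Claim_equal_shortestCycle := by
  intro s _
  show shortestCycle s = shortestCycle_alt s
  simp only [shortestCycle, shortestCycle_alt]
  exact main_eq s.toList
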